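-- pv_equiv track=rewrite | github.com/HenrikMidtun/WhoToPay | src/main/python/utils/HomebrewUtils.py | k_combinations
-- ===== SOURCE A (Python) =====
-- def k_combinations(arr:[], k:int):
--     r_list = []
--     for i in range(len(arr)):
--         if len(arr) - i < k:
--             break
--         temp_list = [arr[i]]
--         if len(temp_list) != k:
--             for y in range(i+1,len(arr)):
--                 temp_list.append(arr[y])
--                 if(len(temp_list) == k):
--                     r_list.append(temp_list)
--                     temp_list = [arr[i]]
--         else:
--             r_list.append(temp_list)
--     return r_list
-- ===== SOURCE B (Python) =====
-- def k_combinations(arr, k):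
--     # Group arr into k-length windows: for each start i, emit [arr[i]] followed by
--     # successive whole (k-1)-sized slices of arr[i+1:], by slicing instead of
--     # element-by-element accumulate-and-reset.
--     if k == 1:
--         return [[x] for x in arr]
--     out = []
--     if k >= 2:
--         for i, head in enumerate(arr):
--             rest = arr[i + 1:]
--             while len(rest) >= k - 1:
--                 out.append([head] + rest[:k - 1])
--                 rest = rest[k - 1:]
--     return out
-- ===== Notes on version B (the rewrite author's own statement) =====
-- stated objective: simpler
-- what changed: Replaces A's accumulate-and-reset temp_list loop (appending one element at a time and resetting on full windows) with direct slicing: for each start index, whole (k-1)-sized chunks of the tail are cut off by slices in a while loop; k==1 and k<2 are handled up front instead of falling out of the length test.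
import Mathlib
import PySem

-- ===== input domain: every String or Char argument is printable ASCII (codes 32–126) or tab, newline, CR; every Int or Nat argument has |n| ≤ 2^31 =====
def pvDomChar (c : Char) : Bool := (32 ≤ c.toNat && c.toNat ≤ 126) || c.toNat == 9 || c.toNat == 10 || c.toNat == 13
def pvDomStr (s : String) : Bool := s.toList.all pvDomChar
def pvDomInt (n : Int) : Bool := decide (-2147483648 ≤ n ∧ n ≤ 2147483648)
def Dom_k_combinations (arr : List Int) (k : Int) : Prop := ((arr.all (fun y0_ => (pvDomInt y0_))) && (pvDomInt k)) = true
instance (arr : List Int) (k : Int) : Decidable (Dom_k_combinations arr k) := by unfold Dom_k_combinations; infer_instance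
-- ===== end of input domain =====

-- B replaces A's element-by-element accumulate-and-reset temp_list with whole-chunk slicing per start index (objective: simpler).


-- ===== PORT A =====
-- inner-loop body: temp_list.append(arr[y]); if len(temp_list)==k: r_list.append(temp_list); temp_list=[arr[i]]
-- state = (r_list, temp_list); v is the appended value arr[y]
def kAinnerStep (k : Int) (xi : Int) (st : List (List Int) × List Int) (v : Int) : List (List Int) × List Int :=
  let temp := st.2 ++ [v]
  if (temp.length : Int) = k then (st.1 ++ [temp], [xi]) else (st.1, temp)

-- the 'for i in range(len(arr))' loop with its break, threading r_list
def kAouter (arr : List Int) (k : Int) (i : Nat) (r : List (List Int)) : List (List Int) :=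
  if _ : i < arr.length then
    if (arr.length : Int) - (i : Int) < k then r      -- break
    else
      -- xi = arr[i] (in range), temp_list starts as [xi]
      if (([PySem.List.pyGetD arr (i : Int) 0].length : Int) ≠ k) then
        kAouter arr k (i + 1)
          (((PySem.List.pyRange ((i : Int) + 1) (PySem.List.len arr) 1).foldl
            (fun st y => kAinnerStep k (PySem.List.pyGetD arr (i : Int) 0) st
              (PySem.List.pyGetD arr y 0)) (r, [PySem.List.pyGetD arr (i : Int) 0])).1)
      else kAouter arr k (i + 1) (r ++ [[PySem.List.pyGetD arr (i : Int) 0]])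
  else r
termination_by arr.length - i

def k_combinations (arr : List Int) (k : Int) : List (List Int) :=
  kAouter arr k 0 []

-- ===== PORT B =====
-- the 'while len(rest) >= k-1' slicing loop; km1 = k-1 as a Nat (exact: called only with k >= 2);
-- the '0 < km1' conjunct only makes the recursion total and holds on every call
def chunkB (head : Int) (km1 : Nat) (rest : List Int) : List (List Int) :=
  if _h : 0 < km1 ∧ km1 ≤ rest.length then
    (head :: rest.take km1) :: chunkB head km1 (rest.drop km1)
  else []
termination_by rest.length
decreasing_by simp [List.length_drop]; omega

def k_combinations_alt (arr : List Int) (k : Int) : List (List Int) :=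
  if k = 1 then arr.map (fun x => [x])
  else if 2 ≤ k then
    (PySem.List.enumerate arr 0).foldl
      (fun out p =>
        out ++ chunkB p.2 (k - 1).toNat (PySem.List.slice arr (some (p.1 + 1)) none)) []
  else []

-- ===== PRECONDITION & SPEC =====
def Spec_k_combinations (arr : List Int) (k : Int) (out : List (List Int)) : Prop := out = k_combinations_alt arr k
instance (arr : List Int) (k : Int) (out : List (List Int)) : Decidable (Spec_k_combinations arr k out) := by unfold Spec_k_combinations; infer_instance

-- ===== CLAIM (what is proved, stated in full; the proofs are below) =====
def Claim_equal_k_combinations : Prop := ∀ (arr : List Int) (k : Int), Dom_k_combinations arr k → Spec_k_combinations arr k (k_combinations arr k)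

-- ===== LEMMAS AND PROOFS =====

-- reference chunking: partial group p (head xi not yet counted), reset on full windows
def specChunks (xi : Int) (m : Nat) : List Int → List Int → List (List Int)
  | _, [] => []
  | p, y :: ys =>
      if p.length + 1 = m then (xi :: (p ++ [y])) :: specChunks xi m [] ys
      else specChunks xi m (p ++ [y]) ys

-- inner fold of A computes specChunks
theorem innerA_eq_specChunks (k : Int) (xi : Int) (km1 : Nat) (hk : (km1 : Int) = k - 1) :
    ∀ (ys : List Int) (r : List (List Int)) (p : List Int), p.length < km1 →
      (ys.foldl (kAinnerStep k xi) (r, xi :: p)).1 = r ++ specChunks xi km1 p ys := by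
  intro ys
  induction ys with
  | nil => intro r p _; simp [specChunks]
  | cons y ys ih =>
      intro r p hp
      simp only [List.foldl_cons, kAinnerStep, specChunks]
      have hlen : ((xi :: p) ++ [y]).length = p.length + 2 := by simp
      by_cases hcond : p.length + 1 = km1
      · have : ((((xi :: p) ++ [y]).length : Nat) : Int) = k := by
          rw [hlen]; push_cast; omega
        simp only [this, if_pos hcond]
        have h0 : ([] : List Int).length < km1 := by simp; omega
        have := ih (r ++ [(xi :: p) ++ [y]]) [] h0
        simpa [List.append_assoc] using this
      · have hne : ((((xi :: p) ++ [y]).length : Nat) : Int) ≠ k := by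
          rw [hlen]; push_cast; omega
        simp only [if_neg hne, if_neg hcond]
        have hp' : (p ++ [y]).length < km1 := by
          simp; omega
        have := ih r (p ++ [y]) hp'
        simpa using this

-- stepped unfolding of specChunks from a partial group
theorem specChunks_step (xi : Int) (m : Nat) :
    ∀ (ys : List Int) (p : List Int), p.length < m →
      specChunks xi m p ys =
        if m - p.length ≤ ys.length then
          (xi :: (p ++ ys.take (m - p.length))) ::
            specChunks xi m [] (ys.drop (m - p.length))
        else [] := by
  intro ys
  induction ys with
  | nil => intro p hp; simp [specChunks]; omega
  | cons y ys ih =>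
      intro p hp
      simp only [specChunks]
      by_cases hcond : p.length + 1 = m
      · have h1 : m - p.length = 1 := by omega
        rw [if_pos hcond, h1]
        rw [if_pos (by simp only [List.length_cons]; omega)]
        simp
      · have hlt : p.length + 1 < m := by omega
        obtain ⟨t, ht⟩ : ∃ t, m - p.length = t + 1 := ⟨m - p.length - 1, by omega⟩
        rw [if_neg hcond, ih (p ++ [y]) (by simp; omega)]
        have h2 : m - (p ++ [y]).length = t := by simp; omega
        rw [h2, ht]
        simp only [List.take_succ_cons, List.drop_succ_cons, List.length_cons]
        by_cases hle : t ≤ ys.length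
        · rw [if_pos hle, if_pos (by omega)]
          simp
        · rw [if_neg hle, if_neg (by omega)]

-- B's while-loop equals specChunks from the empty partial group
theorem chunkB_eq_specChunks (xi : Int) (m : Nat) (hm : 0 < m) :
    ∀ (ys : List Int), chunkB xi m ys = specChunks xi m [] ys := by
  intro ys
  induction hn : ys.length using Nat.strong_induction_on generalizing ys with
  | _ n ih =>
    subst hn
    rw [chunkB, specChunks_step xi m ys [] (by simpa)]
    simp only [List.nil_append, List.length_nil, Nat.sub_zero]
    by_cases hle : m ≤ ys.length
    · rw [dif_pos ⟨hm, hle⟩, if_pos hle]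
      rw [ih (ys.drop m).length (by simp; omega) (ys.drop m) rfl]
    · rw [dif_neg (by omega), if_neg hle]

-- the accumulator-threaded r_list splits off
theorem kAouter_break (arr : List Int) (k : Int) :
    ∀ (i : Nat) (r : List (List Int)), (arr.length : Int) - (i : Int) < k →
      kAouter arr k i r = r := by
  intro i
  induction hn : arr.length - i using Nat.strong_induction_on generalizing i with
  | _ n ih =>
    subst hn
    intro r hbr
    rw [kAouter]
    by_cases hi : i < arr.length
    · rw [dif_pos hi, if_pos hbr]
    · rw [dif_neg hi]

-- chunkB is empty when the tail is too short
theorem chunkB_short (xi : Int) (m : Nat) (ys : List Int) (h : ys.length < m) :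
    chunkB xi m ys = [] := by
  rw [chunkB, dif_neg (by omega)]

-- per-index group function of B
def pvF (arr : List Int) (km1 : Nat) (p : Int × Int) : List (List Int) :=
  chunkB p.2 km1 (PySem.List.slice arr (some (p.1 + 1)) none)

theorem slice_from_succ (arr : List Int) (j : Nat) :
    PySem.List.slice arr (some ((j : Int) + 1)) none = arr.drop (j + 1) := by
  have : ((j : Int) + 1) = ((j + 1 : Nat) : Int) := by push_cast; ring
  rw [this, PySem.List.slice_from_natCast]

theorem enumerate_drop_cons (arr : List Int) (i : Nat) (h : i < arr.length) :
    (PySem.List.enumerate arr 0).drop i =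
      ((i : Int), arr[i]) :: (PySem.List.enumerate arr 0).drop (i + 1) := by
  have hlen : i < (PySem.List.enumerate arr 0).length := by
    rw [PySem.List.length_enumerate]; exact h
  rw [List.drop_eq_getElem_cons hlen, PySem.List.getElem_enumerate]
  simp

-- main outer lemma for k ≥ 2
theorem kAouter_eq_flatMap (arr : List Int) (k : Int) (km1 : Nat)
    (hk : (km1 : Int) = k - 1) (hk2 : 2 ≤ k) :
    ∀ (i : Nat) (r : List (List Int)),
      kAouter arr k i r =
        r ++ ((PySem.List.enumerate arr 0).drop i).flatMap (pvF arr km1) := by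
  intro i
  induction hn : arr.length - i using Nat.strong_induction_on generalizing i with
  | _ n ih =>
    subst hn
    intro r
    by_cases hi : i < arr.length
    · rw [enumerate_drop_cons arr i hi, List.flatMap_cons]
      by_cases hbr : (arr.length : Int) - (i : Int) < k
      · rw [kAouter_break arr k i r hbr]
        have hF : pvF arr km1 ((i : Int), arr[i]) = [] := by
          unfold pvF
          rw [slice_from_succ]
          apply chunkB_short
          simp; omega
        have htail : ((PySem.List.enumerate arr 0).drop (i + 1)).flatMap (pvF arr km1) = [] := by
          have h1 := ih (arr.length - (i + 1)) (by omega) (i + 1) rfl r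
          have h2 : kAouter arr k (i + 1) r = r := by
            by_cases hi2 : i + 1 < arr.length
            · exact kAouter_break arr k (i + 1) r (by push_cast; omega)
            · rw [kAouter, dif_neg hi2]
          rw [h2] at h1
          have := h1.symm
          simpa using this
        rw [hF, htail]; simp
      · have hxi : PySem.List.pyGetD arr (i : Int) 0 = arr[i] := by
          rw [PySem.List.pyGetD_natCast]; exact List.getD_eq_getElem arr 0 hi
        rw [kAouter, dif_pos hi, if_neg hbr,
          if_pos (by simp only [List.length_cons, List.length_nil]; omega)]
        have hfold :
            ((PySem.List.pyRange ((i : Int) + 1) (PySem.List.len arr) 1).foldl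
              (fun st y => kAinnerStep k (PySem.List.pyGetD arr (i : Int) 0) st
                (PySem.List.pyGetD arr y 0)) (r, [PySem.List.pyGetD arr (i : Int) 0])).1
              = r ++ chunkB arr[i] km1 (arr.drop (i + 1)) := by
          rw [PySem.List.foldl_pyRange_pyGetD arr 0
            (kAinnerStep k (PySem.List.pyGetD arr (i : Int) 0))
            (r, [PySem.List.pyGetD arr (i : Int) 0])
            (show (0 : Int) ≤ (i : Int) + 1 by omega)]
          have hto : ((i : Int) + 1).toNat = i + 1 := by omega
          rw [hto, hxi]
          rw [innerA_eq_specChunks k arr[i] km1 hk (arr.drop (i + 1)) r [] (by simp; omega)]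
          rw [chunkB_eq_specChunks arr[i] km1 (by omega)]
        rw [hfold]
        have hFi : pvF arr km1 ((i : Int), arr[i]) = chunkB arr[i] km1 (arr.drop (i + 1)) := by
          unfold pvF; rw [slice_from_succ]
        rw [hFi]
        rw [ih (arr.length - (i + 1)) (by omega) (i + 1) rfl]
        simp [List.append_assoc]
    · rw [kAouter, dif_neg hi]
      have : (PySem.List.enumerate arr 0).drop i = [] := by
        apply List.drop_eq_nil_of_le
        rw [PySem.List.length_enumerate]; omega
      rw [this]; simp

-- k = 1: A emits the singletons of the suffix
theorem kAouter_one (arr : List Int) :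
    ∀ (i : Nat) (r : List (List Int)),
      kAouter arr 1 i r = r ++ (arr.drop i).map (fun x => [x]) := by
  intro i
  induction hn : arr.length - i using Nat.strong_induction_on generalizing i with
  | _ n ih =>
    subst hn
    intro r
    by_cases hi : i < arr.length
    · rw [kAouter, dif_pos hi, if_neg (by omega),
        if_neg (by simp only [List.length_cons, List.length_nil]; omega)]
      have hxi : PySem.List.pyGetD arr (i : Int) 0 = arr[i] := by
        rw [PySem.List.pyGetD_natCast]; exact List.getD_eq_getElem arr 0 hi
      rw [hxi, ih (arr.length - (i + 1)) (by omega) (i + 1) rfl]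
      rw [List.drop_eq_getElem_cons hi]
      simp only [List.map_cons, List.append_assoc, List.cons_append, List.nil_append]
    · rw [kAouter, dif_neg hi, List.drop_eq_nil_of_le (by omega)]
      simp

-- k ≤ 0: the inner fold never emits a group
theorem innerA_nonpos (k : Int) (hk : k ≤ 0) (xi : Int) :
    ∀ (ys : List Int) (r : List (List Int)) (t : List Int),
      (ys.foldl (kAinnerStep k xi) (r, t)).1 = r := by
  intro ys
  induction ys with
  | nil => intro r t; rfl
  | cons y ys ih =>
      intro r t
      simp only [List.foldl_cons, kAinnerStep]
      rw [if_neg (by simp; omega)]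
      exact ih r (t ++ [y])

theorem kAouter_nonpos (arr : List Int) (k : Int) (hk : k ≤ 0) :
    ∀ (i : Nat) (r : List (List Int)), kAouter arr k i r = r := by
  intro i
  induction hn : arr.length - i using Nat.strong_induction_on generalizing i with
  | _ n ih =>
    subst hn
    intro r
    by_cases hi : i < arr.length
    · rw [kAouter, dif_pos hi, if_neg (by omega),
        if_pos (by simp only [List.length_cons, List.length_nil]; omega)]
      rw [PySem.List.foldl_pyRange_pyGetD arr 0
        (kAinnerStep k (PySem.List.pyGetD arr (i : Int) 0))
        (r, [PySem.List.pyGetD arr (i : Int) 0])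
        (show (0 : Int) ≤ (i : Int) + 1 by omega)]
      rw [innerA_nonpos k hk _ _ r _]
      exact ih (arr.length - (i + 1)) (by omega) (i + 1) rfl r
    · rw [kAouter, dif_neg hi]

-- B's foldl-append is a flatMap
theorem altB_eq_flatMap (arr : List Int) (km1 : Nat) :
    ∀ (l : List (Int × Int)) (init : List (List Int)),
      l.foldl (fun out p => out ++ chunkB p.2 km1 (PySem.List.slice arr (some (p.1 + 1)) none)) init
        = init ++ l.flatMap (pvF arr km1) := by
  intro l
  induction l with
  | nil => intro init; simp
  | cons p l ih =>
      intro init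
      simp only [List.foldl_cons, List.flatMap_cons]
      rw [ih]
      simp [pvF, List.append_assoc]

-- ===== VERDICT (by name: the statement is the Claim_ definition above) =====
theorem k_combinations_spec : Claim_equal_k_combinations := by
  intro arr k _
  unfold Spec_k_combinations k_combinations k_combinations_alt
  by_cases h1 : k = 1
  · subst h1
    rw [if_pos rfl, kAouter_one arr 0 []]
    simp
  · rw [if_neg h1]
    by_cases h2 : 2 ≤ k
    · rw [if_pos h2]
      have hk : (((k - 1).toNat : Nat) : Int) = k - 1 := by omega
      rw [kAouter_eq_flatMap arr k (k - 1).toNat hk h2 0 []]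
      rw [altB_eq_flatMap arr (k - 1).toNat (PySem.List.enumerate arr 0) []]
      simp
    · rw [if_neg h2]
      exact kAouter_nonpos arr k (by omega) 0 []
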